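-- pv_equiv track=rewrite | github.com/Skylight666/for_csc_i_love_gitlab | AllForPython/dscr/kyan.py | am_nam
-- ===== SOURCE A (Python) =====
-- def am_nam(l):
--     #cnt_sym = len(l[0])
--     sh_l = set()
--     adding = set(l)
--     for a1 in l:
--         for a2 in l:
--             cntr = 0
--             buf = ''
--             for i in range(4):
--                 if a1[i] == a2[i]:
--                     buf += a1[i]
--                     cntr += 1
--                 else:
--                     buf += '-'
--             if cntr == 3:
--                 sh_l.add(buf)
--                 adding.discard(a1)
--                 adding.discard(a2)
--     if sh_l.union(adding) == set(l):
--         return sh_l.union(adding)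
--     else:
--         return am_nam(sh_l.union(adding))
-- ===== SOURCE B (Python) =====
-- def am_nam(l):
--     cur = set(l)
--     while True:
--         buckets = {}
--         for j in range(4):
--             for s in cur:
--                 buckets.setdefault((j, s[:j] + '-' + s[j + 1:4]), []).append(s)
--         diff = [(key, grp) for key, grp in buckets.items()
--                 if any(t[key[0]] != grp[0][key[0]] for t in grp)]
--         masks = {key[1] for key, grp in diff}
--         matched = {s for _key, grp in diff for s in grp}
--         nxt = masks | (cur - matched)
--         if nxt == cur:
--             return nxt
--         cur = nxt
-- ===== Notes on version B (the rewrite author's own statement) =====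
-- stated objective: faster
-- what changed: Each recursion level of A compares all O(n^2) ordered string pairs position by position; B instead buckets the strings by their four one-position-masked keys in a dictionary, so the masks and matched strings of a level are found in O(n) hash work, iterating the same fixpoint and returning the same set.
import Mathlib
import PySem

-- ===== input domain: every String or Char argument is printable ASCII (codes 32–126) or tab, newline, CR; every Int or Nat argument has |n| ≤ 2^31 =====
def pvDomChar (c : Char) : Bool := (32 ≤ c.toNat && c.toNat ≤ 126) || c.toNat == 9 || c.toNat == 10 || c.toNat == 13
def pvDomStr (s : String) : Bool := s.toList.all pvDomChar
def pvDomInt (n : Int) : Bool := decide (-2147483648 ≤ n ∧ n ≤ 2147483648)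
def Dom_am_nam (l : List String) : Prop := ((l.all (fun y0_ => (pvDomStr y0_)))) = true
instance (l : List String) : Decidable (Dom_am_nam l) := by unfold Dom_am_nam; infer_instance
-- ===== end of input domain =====

-- B replaces A's all-pairs scan per level (O(n^2) string pairs) by hashing each string under its four
-- one-position masks, so each level is O(n) dictionary work; same fixpoint iteration, same result set.
-- Python returns a *set* (no modelled iteration order): both ports return its sorted-list representation.

-- ===== PORT A =====
-- the inner 'for i in range(4)' of A, building (cntr, buf); char-list level (String append is kernel-opaque)
def pvCntrBuf (a1 a2 : List Char) : Int × List Char :=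
  (PySem.List.pyRange 0 4 1).foldl
    (fun st i =>
      match PySem.List.pyGet? a1 i, PySem.List.pyGet? a2 i with
      | some c1, some c2 =>
          if c1 = c2 then (st.1 + 1, st.2 ++ [c1]) else (st.1, st.2 ++ ['-'])
      | _, _ => st)      -- Python raises IndexError here; such inputs are outside Pre_am_nam
    (0, [])

-- one recursion level of A: the double 'for a1 in l: for a2 in l:' building (sh_l, adding)
def pvStepA (L : List String) : PySem.Set String × PySem.Set String :=
  L.foldl (fun st a1 =>
    L.foldl (fun st a2 =>
      let cb := pvCntrBuf a1.toList a2.toList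
      if cb.1 = 3 then
        (PySem.Set.add st.1 (String.ofList cb.2),
         PySem.Set.discard (PySem.Set.discard st.2 a1) a2)
      else st) st)
    (PySem.Set.empty, PySem.Set.ofList L)

-- A's recursion 'return am_nam(sh_l.union(adding))'; fuel bounds the depth (see comment at am_nam)
def pvLoopA : Nat → List String → List String
  | 0, L => PySem.Set.ofList L       -- never reached for the fuel am_nam supplies
  | fuel+1, L =>
      let st := pvStepA L
      let S' := PySem.Set.union st.1 st.2
      if PySem.Set.equal S' (PySem.Set.ofList L) then S'
      else pvLoopA fuel S'

-- fuel (17·|l|+1)^5: every set the recursion visits lives in the ≤ 17·|l| strings {s, s[:4] masked on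
-- a subset of positions | s ∈ l}, and a 5-component lexicographic measure over it shrinks each level.
def am_nam (l : List String) : List String :=
  PySem.List.sorted (pvLoopA ((17 * l.length + 1) ^ 5) l) (fun s => s) false

-- ===== PORT B =====
-- s[:j] + '-' + s[j+1:4]  (char-list level, exact slices)
def pvKey (s : String) (j : Int) : String :=
  String.ofList (PySem.Chars.slice s.toList (some 0) (some j) ++ ['-'] ++
             PySem.Chars.slice s.toList (some (j + 1)) (some 4))

-- the keyed stream of B's two bucket-filling loops: ((j, masked key), s) for j in range(4), s in cur
def pvPairList (cur : List String) : List ((Int × String) × String) :=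
  (PySem.List.pyRange 0 4 1).flatMap (fun j => cur.map (fun s => ((j, pvKey s j), s)))

-- buckets.setdefault((j, key), []).append(s)
def pvBuckets (cur : List String) : PySem.Dict (Int × String) (List String) :=
  (pvPairList cur).foldl (fun d p => d.modify p.1 [] (fun v => v ++ [p.2])) PySem.Dict.empty

-- any(t[j] != grp[0][j] for t in grp)   (grp nonempty whenever it is a bucket)
def pvGrpDiff (j : Int) (grp : List String) : Bool :=
  match grp with
  | [] => false
  | g0 :: _ => grp.any (fun t => PySem.Str.pyGet? t j != PySem.Str.pyGet? g0 j)

-- the 'diff' comprehension: buckets whose group shows two different characters at position j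
def pvDiffItems (cur : List String) : List ((Int × String) × List String) :=
  (pvBuckets cur).items.filter (fun p => pvGrpDiff p.1.1 p.2)

-- one while-loop body of B: masks | (cur - matched)
def pvStepB (cur : PySem.Set String) : PySem.Set String :=
  let di := pvDiffItems cur
  let masks : PySem.Set String := PySem.Set.ofList (di.map (fun p => p.1.2))
  let matched : PySem.Set String := PySem.Set.ofList (di.flatMap (fun p => p.2))
  PySem.Set.union masks (PySem.Set.diff cur matched)

-- B's 'while True' loop, same fuel convention as port A
def pvLoopB : Nat → PySem.Set String → List String
  | 0, cur => cur
  | fuel+1, cur =>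
      let nxt := pvStepB cur
      if PySem.Set.equal nxt cur then nxt else pvLoopB fuel nxt

def am_nam_alt (l : List String) : List String :=
  PySem.List.sorted (pvLoopB ((17 * l.length + 1) ^ 5) (PySem.Set.ofList l)) (fun s => s) false

-- ===== PRECONDITION & SPEC =====
-- Pre_: every string has at least 4 characters — A indexes a1[0..3] and raises IndexError otherwise.
def Pre_am_nam (l : List String) : Prop := ∀ s ∈ l, 4 ≤ PySem.Str.len s
instance (l : List String) : Decidable (Pre_am_nam l) := by unfold Pre_am_nam; infer_instance

def pvWitness_am_nam : List String := (["abcd", "abcf", "xyzw"])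

def Spec_am_nam (l : List String) (out : List String) : Prop := out = am_nam_alt l
instance (l : List String) (out : List String) : Decidable (Spec_am_nam l out) := by unfold Spec_am_nam; infer_instance

-- ===== CLAIM (what is proved, stated in full; the proofs are below) =====
def Claim_equal_am_nam : Prop := ∀ (l : List String), Dom_am_nam l → Pre_am_nam l → Spec_am_nam l (am_nam l)

-- ===== LEMMAS AND PROOFS =====

-- proof-side vocabulary
def pvChr (s : String) (i : ℕ) : Char := s.toList.getD i ' '

def pvMatch (a b : String) (j : ℕ) : Prop :=
  j < 4 ∧ pvChr a j ≠ pvChr b j ∧ ∀ i, i < 4 → i ≠ j → pvChr a i = pvChr b i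

def pvLen4 (L : List String) : Prop := ∀ s ∈ L, 4 ≤ s.toList.length

-- membership in the next level's set, as a predicate over membership in the current set only
def pvNextP (L : List String) (x : String) : Prop :=
  (∃ a ∈ L, ∃ b ∈ L, ∃ j, pvMatch a b j ∧ x = pvKey a (j : ℤ)) ∨
  (x ∈ L ∧ ¬ ∃ b ∈ L, ∃ j, pvMatch x b j)

theorem pv_pg (xs : List Char) (i : ℕ) (h : i < xs.length) :
    PySem.List.pyGet? xs (i : ℤ) = some (xs.getD i ' ') := by
  simp [PySem.List.pyGet?_natCast, List.getElem?_eq_getElem h, List.getD_eq_getElem _ _ h]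

theorem pv_cntrBuf_eq (a b : String) (ha : 4 ≤ a.toList.length) (hb : 4 ≤ b.toList.length) :
    pvCntrBuf a.toList b.toList =
      (((if pvChr a 0 = pvChr b 0 then (1:ℤ) else 0) + (if pvChr a 1 = pvChr b 1 then 1 else 0) +
        (if pvChr a 2 = pvChr b 2 then 1 else 0) + (if pvChr a 3 = pvChr b 3 then 1 else 0)),
       [(if pvChr a 0 = pvChr b 0 then pvChr a 0 else '-'),
        (if pvChr a 1 = pvChr b 1 then pvChr a 1 else '-'),
        (if pvChr a 2 = pvChr b 2 then pvChr a 2 else '-'),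
        (if pvChr a 3 = pvChr b 3 then pvChr a 3 else '-')]) := by
  have ga0 : PySem.List.pyGet? a.toList (0:ℤ) = some (pvChr a 0) := by
    simpa [pvChr] using pv_pg a.toList 0 (by omega)
  have ga1 : PySem.List.pyGet? a.toList (1:ℤ) = some (pvChr a 1) := by
    simpa [pvChr] using pv_pg a.toList 1 (by omega)
  have ga2 : PySem.List.pyGet? a.toList (2:ℤ) = some (pvChr a 2) := by
    simpa [pvChr] using pv_pg a.toList 2 (by omega)
  have ga3 : PySem.List.pyGet? a.toList (3:ℤ) = some (pvChr a 3) := by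
    simpa [pvChr] using pv_pg a.toList 3 (by omega)
  have gb0 : PySem.List.pyGet? b.toList (0:ℤ) = some (pvChr b 0) := by
    simpa [pvChr] using pv_pg b.toList 0 (by omega)
  have gb1 : PySem.List.pyGet? b.toList (1:ℤ) = some (pvChr b 1) := by
    simpa [pvChr] using pv_pg b.toList 1 (by omega)
  have gb2 : PySem.List.pyGet? b.toList (2:ℤ) = some (pvChr b 2) := by
    simpa [pvChr] using pv_pg b.toList 2 (by omega)
  have gb3 : PySem.List.pyGet? b.toList (3:ℤ) = some (pvChr b 3) := by
    simpa [pvChr] using pv_pg b.toList 3 (by omega)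
  by_cases h0 : pvChr a 0 = pvChr b 0 <;> by_cases h1 : pvChr a 1 = pvChr b 1 <;>
    by_cases h2 : pvChr a 2 = pvChr b 2 <;> by_cases h3 : pvChr a 3 = pvChr b 3 <;>
      simp [pvCntrBuf, show PySem.List.pyRange 0 4 1 = [0,1,2,3] from rfl,
            ga0, ga1, ga2, ga3, gb0, gb1, gb2, gb3, h0, h1, h2, h3]

theorem pv_exists_match_iff (a b : String) :
    (∃ j, pvMatch a b j) ↔
      ((pvChr a 0 ≠ pvChr b 0 ∧ pvChr a 1 = pvChr b 1 ∧ pvChr a 2 = pvChr b 2 ∧ pvChr a 3 = pvChr b 3) ∨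
       (pvChr a 0 = pvChr b 0 ∧ pvChr a 1 ≠ pvChr b 1 ∧ pvChr a 2 = pvChr b 2 ∧ pvChr a 3 = pvChr b 3) ∨
       (pvChr a 0 = pvChr b 0 ∧ pvChr a 1 = pvChr b 1 ∧ pvChr a 2 ≠ pvChr b 2 ∧ pvChr a 3 = pvChr b 3) ∨
       (pvChr a 0 = pvChr b 0 ∧ pvChr a 1 = pvChr b 1 ∧ pvChr a 2 = pvChr b 2 ∧ pvChr a 3 ≠ pvChr b 3)) := by
  constructor
  · rintro ⟨j, hj, hne, hag⟩
    interval_cases j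
    · exact Or.inl ⟨hne, hag 1 (by omega) (by omega), hag 2 (by omega) (by omega), hag 3 (by omega) (by omega)⟩
    · exact Or.inr (Or.inl ⟨hag 0 (by omega) (by omega), hne, hag 2 (by omega) (by omega), hag 3 (by omega) (by omega)⟩)
    · exact Or.inr (Or.inr (Or.inl ⟨hag 0 (by omega) (by omega), hag 1 (by omega) (by omega), hne, hag 3 (by omega) (by omega)⟩))
    · exact Or.inr (Or.inr (Or.inr ⟨hag 0 (by omega) (by omega), hag 1 (by omega) (by omega), hag 2 (by omega) (by omega), hne⟩))
  · rintro (⟨h0, h1, h2, h3⟩ | ⟨h0, h1, h2, h3⟩ | ⟨h0, h1, h2, h3⟩ | ⟨h0, h1, h2, h3⟩)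
    · exact ⟨0, by omega, h0, by intro i hi hij; interval_cases i <;> simp_all⟩
    · exact ⟨1, by omega, h1, by intro i hi hij; interval_cases i <;> simp_all⟩
    · exact ⟨2, by omega, h2, by intro i hi hij; interval_cases i <;> simp_all⟩
    · exact ⟨3, by omega, h3, by intro i hi hij; interval_cases i <;> simp_all⟩

theorem pv_cnt3_iff (a b : String) (ha : 4 ≤ a.toList.length) (hb : 4 ≤ b.toList.length) :
    (pvCntrBuf a.toList b.toList).1 = 3 ↔ ∃ j, pvMatch a b j := by
  rw [pv_cntrBuf_eq a b ha hb, pv_exists_match_iff]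
  by_cases h0 : pvChr a 0 = pvChr b 0 <;> by_cases h1 : pvChr a 1 = pvChr b 1 <;>
    by_cases h2 : pvChr a 2 = pvChr b 2 <;> by_cases h3 : pvChr a 3 = pvChr b 3 <;>
      simp [h0, h1, h2, h3]

theorem pv_key_list (cs : List Char) (j : ℕ) (hj : j < 4) (h : 4 ≤ cs.length) :
    List.take j cs ++ ['-'] ++ List.take (4 - (j + 1)) (List.drop (j + 1) cs) =
      (List.range 4).map (fun i => if i = j then '-' else cs.getD i ' ') := by
  apply List.ext_getElem
  · simp; omega
  · intro i hL h4
    have hi4 : i < 4 := by simpa using h4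
    rw [List.getElem_map, List.getElem_range]
    by_cases h1 : i < j
    · rw [List.getElem_append_left (by simp; omega), List.getElem_append_left (by simp; omega),
        List.getElem_take, if_neg (by omega), List.getD_eq_getElem _ _ (by omega)]
    · by_cases h2 : i = j
      · rw [List.getElem_append_left (by simp; omega),
          List.getElem_append_right (by simp; omega), if_pos h2]
        simp
      · rw [List.getElem_append_right (by simp; omega), List.getElem_take, List.getElem_drop,
          if_neg h2, List.getD_eq_getElem _ _ (by omega)]
        have hidx : j + 1 + (i - ((List.take j cs ++ ['-']).length)) = i := by simp; omega
        simp only [hidx]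

theorem pv_key_toList (s : String) (j : ℕ) (hj : j < 4) (hs : 4 ≤ s.toList.length) :
    (pvKey s (j : ℤ)).toList = (List.range 4).map (fun i => if i = j then '-' else pvChr s i) := by
  unfold pvKey
  rw [String.toList_ofList, PySem.Chars.slice_eq_listSlice, PySem.Chars.slice_eq_listSlice]
  have e1 : PySem.List.slice s.toList (some 0) (some (j : ℤ)) = List.take j s.toList := by
    simpa using PySem.List.slice_natCast s.toList 0 j
  have e2 : PySem.List.slice s.toList (some ((j : ℤ) + 1)) (some 4) =
      List.take (4 - (j + 1)) (List.drop (j + 1) s.toList) := by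
    have h := PySem.List.slice_natCast s.toList (j + 1) 4
    push_cast at h
    simpa using h
  rw [e1, e2, pv_key_list s.toList j hj hs]
  rfl

theorem pv_key_len (s : String) (j : ℕ) (hj : j < 4) (hs : 4 ≤ s.toList.length) :
    (pvKey s (j : ℤ)).toList.length = 4 := by
  rw [pv_key_toList s j hj hs]; simp

theorem pv_key_eq_iff (a b : String) (j : ℕ) (hj : j < 4)
    (ha : 4 ≤ a.toList.length) (hb : 4 ≤ b.toList.length) :
    pvKey a (j : ℤ) = pvKey b (j : ℤ) ↔ ∀ i, i < 4 → i ≠ j → pvChr a i = pvChr b i := by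
  rw [← String.toList_inj, pv_key_toList a j hj ha, pv_key_toList b j hj hb]
  constructor
  · intro h i hi hij
    have h1 : ((List.range 4).map (fun i => if i = j then '-' else pvChr a i))[i]'(by simpa using hi) =
        ((List.range 4).map (fun i => if i = j then '-' else pvChr b i))[i]'(by simpa using hi) := by
      simp only [h]
    rw [List.getElem_map, List.getElem_range, List.getElem_map, List.getElem_range,
      if_neg hij, if_neg hij] at h1
    exact h1
  · intro h
    apply List.ext_getElem
    · simp
    · intro i h1 h2
      have hi4 : i < 4 := by simpa using h1
      rw [List.getElem_map, List.getElem_range, List.getElem_map, List.getElem_range]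
      by_cases hij : i = j
      · simp [hij]
      · rw [if_neg hij, if_neg hij]
        exact h i hi4 hij

theorem pv_buf_eq_key (a b : String) (ha : 4 ≤ a.toList.length) (hb : 4 ≤ b.toList.length)
    (j : ℕ) (hm : pvMatch a b j) :
    String.ofList (pvCntrBuf a.toList b.toList).2 = pvKey a (j : ℤ) := by
  obtain ⟨hj, hne, hag⟩ := hm
  rw [pv_cntrBuf_eq a b ha hb]
  apply String.toList_inj.mp
  rw [String.toList_ofList, pv_key_toList a j hj ha,
    show List.range 4 = [0,1,2,3] from rfl]
  simp only [List.map_cons, List.map_nil]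
  interval_cases j
  · simp [if_neg hne, hag 1 (by omega) (by omega), hag 2 (by omega) (by omega),
      hag 3 (by omega) (by omega)]
  · simp [if_neg hne, hag 0 (by omega) (by omega), hag 2 (by omega) (by omega),
      hag 3 (by omega) (by omega)]
  · simp [if_neg hne, hag 0 (by omega) (by omega), hag 1 (by omega) (by omega),
      hag 3 (by omega) (by omega)]
  · simp [if_neg hne, hag 0 (by omega) (by omega), hag 1 (by omega) (by omega),
      hag 2 (by omega) (by omega)]

theorem pv_match_symm (a b : String) (j : ℕ) (h : pvMatch a b j) : pvMatch b a j :=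
  ⟨h.1, fun e => h.2.1 e.symm, fun i hi hij => (h.2.2 i hi hij).symm⟩


-- ============ A-side: flatten the double loop and characterise its result ============

def pvStepPair (st : PySem.Set String × PySem.Set String) (p : String × String) :
    PySem.Set String × PySem.Set String :=
  if (pvCntrBuf p.1.toList p.2.toList).1 = 3 then
    (PySem.Set.add st.1 (String.ofList (pvCntrBuf p.1.toList p.2.toList).2),
     PySem.Set.discard (PySem.Set.discard st.2 p.1) p.2)
  else st

def pvPairsA (L : List String) : List (String × String) :=
  L.flatMap (fun a1 => L.map (fun a2 => (a1, a2)))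

theorem pv_mem_pairsA (L : List String) (a b : String) :
    (a, b) ∈ pvPairsA L ↔ a ∈ L ∧ b ∈ L := by
  simp [pvPairsA]

theorem pv_stepA_flat_aux (L L1 : List String) (init : PySem.Set String × PySem.Set String) :
    L1.foldl (fun st a1 =>
      L.foldl (fun st a2 =>
        let cb := pvCntrBuf a1.toList a2.toList
        if cb.1 = 3 then
          (PySem.Set.add st.1 (String.ofList cb.2),
           PySem.Set.discard (PySem.Set.discard st.2 a1) a2)
        else st) st) init
    = (L1.flatMap (fun a1 => L.map (fun a2 => (a1, a2)))).foldl pvStepPair init := by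
  induction L1 generalizing init with
  | nil => rfl
  | cons a1 L1 ih =>
      rw [List.flatMap_cons, List.foldl_append, List.foldl_cons, ih]
      congr 1
      rw [List.foldl_map]
      rfl

theorem pv_stepA_flat (L : List String) :
    pvStepA L = (pvPairsA L).foldl pvStepPair (PySem.Set.empty, PySem.Set.ofList L) := by
  unfold pvStepA pvPairsA
  exact pv_stepA_flat_aux L L _

theorem pv_fold1_mem (ps : List (String × String)) (st : PySem.Set String × PySem.Set String)
    (x : String) :
    x ∈ (ps.foldl pvStepPair st).1 ↔ x ∈ st.1 ∨ ∃ p ∈ ps, (pvCntrBuf p.1.toList p.2.toList).1 = 3 ∧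
      x = String.ofList (pvCntrBuf p.1.toList p.2.toList).2 := by
  induction ps generalizing st with
  | nil => simp
  | cons p ps ih =>
      rw [List.foldl_cons, ih]
      unfold pvStepPair
      split_ifs with hc <;> simp [PySem.Set.mem_add, hc] <;> tauto

theorem pv_fold2_mem (ps : List (String × String)) (st : PySem.Set String × PySem.Set String)
    (x : String) :
    x ∈ (ps.foldl pvStepPair st).2 ↔ x ∈ st.2 ∧ ∀ p ∈ ps,
      (pvCntrBuf p.1.toList p.2.toList).1 = 3 → x ≠ p.1 ∧ x ≠ p.2 := by
  induction ps generalizing st with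
  | nil => simp
  | cons p ps ih =>
      rw [List.foldl_cons, ih]
      unfold pvStepPair
      split_ifs with hc <;> simp [PySem.Set.mem_discard, hc] <;> tauto

theorem pv_fold_nodup (ps : List (String × String)) (st : PySem.Set String × PySem.Set String)
    (h1 : st.1.Nodup) (h2 : st.2.Nodup) :
    (ps.foldl pvStepPair st).1.Nodup ∧ (ps.foldl pvStepPair st).2.Nodup := by
  induction ps generalizing st with
  | nil => exact ⟨h1, h2⟩
  | cons p ps ih =>
      rw [List.foldl_cons]
      unfold pvStepPair
      split_ifs with hc
      · exact ih _ (PySem.Set.nodup_add _ _ h1)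
          (PySem.Set.nodup_discard _ _ (PySem.Set.nodup_discard _ _ h2))
      · exact ih _ h1 h2

theorem pv_stepA_sh_mem (L : List String) (hL : pvLen4 L) (x : String) :
    x ∈ (pvStepA L).1 ↔ ∃ a ∈ L, ∃ b ∈ L, ∃ j, pvMatch a b j ∧ x = pvKey a (j : ℤ) := by
  rw [pv_stepA_flat, pv_fold1_mem]
  constructor
  · rintro (h | ⟨⟨a, b⟩, hp, hc, hx⟩)
    · simp [PySem.Set.empty] at h
    · obtain ⟨ha, hb⟩ := (pv_mem_pairsA L a b).mp hp
      obtain ⟨j, hm⟩ := (pv_cnt3_iff a b (hL a ha) (hL b hb)).mp hc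
      exact ⟨a, ha, b, hb, j, hm, by rw [hx, pv_buf_eq_key a b (hL a ha) (hL b hb) j hm]⟩
  · rintro ⟨a, ha, b, hb, j, hm, hx⟩
    refine Or.inr ⟨(a, b), (pv_mem_pairsA L a b).mpr ⟨ha, hb⟩,
      (pv_cnt3_iff a b (hL a ha) (hL b hb)).mpr ⟨j, hm⟩, ?_⟩
    rw [hx, pv_buf_eq_key a b (hL a ha) (hL b hb) j hm]

theorem pv_stepA_ad_mem (L : List String) (hL : pvLen4 L) (x : String) :
    x ∈ (pvStepA L).2 ↔ x ∈ L ∧ ¬ ∃ b ∈ L, ∃ j, pvMatch x b j := by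
  rw [pv_stepA_flat, pv_fold2_mem, PySem.Set.mem_ofList]
  constructor
  · rintro ⟨hx, hall⟩
    refine ⟨hx, ?_⟩
    rintro ⟨b, hb, j, hm⟩
    exact (hall (x, b) ((pv_mem_pairsA L x b).mpr ⟨hx, hb⟩)
      ((pv_cnt3_iff x b (hL x hx) (hL b hb)).mpr ⟨j, hm⟩)).1 rfl
  · rintro ⟨hx, hno⟩
    refine ⟨hx, ?_⟩
    rintro ⟨a, b⟩ hp hc
    obtain ⟨ha, hb⟩ := (pv_mem_pairsA L a b).mp hp
    obtain ⟨j, hm⟩ := (pv_cnt3_iff a b (hL a ha) (hL b hb)).mp hc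
    constructor
    · rintro rfl
      exact hno ⟨b, hb, j, hm⟩
    · rintro rfl
      exact hno ⟨a, ha, j, pv_match_symm a x j hm⟩

theorem pv_stepA_mem (L : List String) (hL : pvLen4 L) (x : String) :
    x ∈ PySem.Set.union (pvStepA L).1 (pvStepA L).2 ↔ pvNextP L x := by
  rw [PySem.Set.mem_union, pv_stepA_sh_mem L hL, pv_stepA_ad_mem L hL, pvNextP]

theorem pv_stepA_nodup (L : List String) :
    (pvStepA L).1.Nodup ∧ (pvStepA L).2.Nodup := by
  rw [pv_stepA_flat]
  exact pv_fold_nodup _ _ (by simp [PySem.Set.empty]) (PySem.Set.nodup_ofList L)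


-- ============ B-side: characterise buckets, groups and the masks/matched sets ============

theorem pv_buckets_getD (cur : List String) (k : ℤ × String) :
    (pvBuckets cur).getD k [] = ((pvPairList cur).filter (fun p => p.1 == k)).map (fun p => p.2) := by
  unfold pvBuckets
  simpa using PySem.Dict.getD_foldl_modify_append (pvPairList cur) PySem.Dict.empty k

theorem pv_int4 (j : ℤ) : j ∈ ([0, 1, 2, 3] : List ℤ) ↔ ∃ n : ℕ, n < 4 ∧ j = (n : ℤ) := by
  constructor
  · intro h
    rcases (by simpa using h : j = 0 ∨ j = 1 ∨ j = 2 ∨ j = 3) with rfl | rfl | rfl | rfl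
    exacts [⟨0, by omega, rfl⟩, ⟨1, by omega, rfl⟩, ⟨2, by omega, rfl⟩, ⟨3, by omega, rfl⟩]
  · rintro ⟨n, hn, rfl⟩
    interval_cases n <;> simp

theorem pv_grp (cur : List String) (j : ℤ) (hj : j ∈ ([0, 1, 2, 3] : List ℤ)) (κ : String) :
    (pvBuckets cur).getD (j, κ) [] = cur.filter (fun s => pvKey s j == κ) := by
  rw [pv_buckets_getD]
  have hb : ∀ (a c : ℤ) (b d : String), ((a, b) == (c, d)) = (a == c && b == d) :=
    fun a c b d => rfl
  rcases (by simpa using hj : j = 0 ∨ j = 1 ∨ j = 2 ∨ j = 3) with rfl | rfl | rfl | rfl <;>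
    · simp only [pvPairList, show PySem.List.pyRange 0 4 1 = [0, 1, 2, 3] from rfl,
        List.flatMap_cons, List.flatMap_nil, List.append_nil, List.filter_append,
        List.filter_map, Function.comp_def, List.map_append, List.map_map]
      simp [hb]

theorem pv_buckets_keys (cur : List String) :
    (pvBuckets cur).keys = PySem.Set.ofList ((pvPairList cur).map (fun p => p.1)) := by
  unfold pvBuckets
  rw [PySem.Dict.keys_foldl_modify_key (pvPairList cur) (fun p => p.1) []
    (fun _ p => fun v => v ++ [p.2]) PySem.Dict.empty]
  rw [show (PySem.Dict.empty : PySem.Dict (ℤ × String) (List String)).keys = [] from rfl,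
    PySem.Set.update_nil_left]

theorem pv_buckets_keys_nodup (cur : List String) : (pvBuckets cur).keys.Nodup := by
  unfold pvBuckets
  exact PySem.Dict.nodup_keys_foldl_modify_key (pvPairList cur) (fun p => p.1) []
    (fun _ p => fun v => v ++ [p.2]) PySem.Dict.empty (by simp [PySem.Dict.empty])

theorem pv_mem_keys (cur : List String) (k : ℤ × String) :
    k ∈ (pvBuckets cur).keys ↔ ∃ j ∈ ([0, 1, 2, 3] : List ℤ), ∃ s ∈ cur, k = (j, pvKey s j) := by
  rw [pv_buckets_keys, PySem.Set.mem_ofList]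
  simp only [pvPairList, show PySem.List.pyRange 0 4 1 = [0, 1, 2, 3] from rfl]
  simp [List.mem_flatMap, eq_comm]

theorem pv_mem_items (cur : List String) (p : (ℤ × String) × List String) :
    p ∈ (pvBuckets cur).items ↔ p.1 ∈ (pvBuckets cur).keys ∧ p.2 = (pvBuckets cur).getD p.1 [] := by
  rw [PySem.Dict.items_eq_map_keys (pvBuckets cur) (pv_buckets_keys_nodup cur) []]
  constructor
  · intro h
    obtain ⟨k, hk, e⟩ := List.mem_map.mp h
    cases e
    exact ⟨hk, rfl⟩
  · rintro ⟨hk, h2⟩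
    exact List.mem_map.mpr ⟨p.1, hk, by rw [← h2]⟩

theorem pv_any_ne_iff (g0 : String) (grp : List String) (n : ℕ) (hn : n < 4)
    (hlen : ∀ t ∈ g0 :: grp, 4 ≤ t.toList.length) :
    pvGrpDiff (n : ℤ) (g0 :: grp) = true ↔
      ∃ s ∈ g0 :: grp, ∃ t ∈ g0 :: grp, pvChr s n ≠ pvChr t n := by
  rw [show pvGrpDiff (n : ℤ) (g0 :: grp) =
    (g0 :: grp).any (fun t => PySem.Str.pyGet? t (n : ℤ) != PySem.Str.pyGet? g0 (n : ℤ)) from rfl]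
  rw [List.any_eq_true]
  have hget : ∀ t ∈ g0 :: grp, PySem.Str.pyGet? t (n : ℤ) = some (pvChr t n) := by
    intro t ht
    have hlt : n < t.toList.length := by have := hlen t ht; omega
    simp [PySem.Str.pyGet?_natCast, List.getElem?_eq_getElem hlt, pvChr,
      List.getD_eq_getElem _ _ hlt]
  have hg0 : g0 ∈ g0 :: grp := List.mem_cons_self
  constructor
  · rintro ⟨t, ht, hbne⟩
    rw [hget t ht, hget g0 hg0] at hbne
    exact ⟨t, ht, g0, hg0, by simpa using hbne⟩
  · rintro ⟨s, hs, t, ht, hne⟩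
    by_cases hx : pvChr s n = pvChr g0 n
    · refine ⟨t, ht, ?_⟩
      rw [hget t ht, hget g0 hg0]
      simpa using fun e => hne (hx.trans e.symm)
    · refine ⟨s, hs, ?_⟩
      rw [hget s hs, hget g0 hg0]
      simpa using hx

theorem pv_grpDiff_iff (cur : List String) (hL : pvLen4 cur) (n : ℕ) (hn : n < 4) (κ : String) :
    pvGrpDiff (n : ℤ) (cur.filter (fun s => pvKey s (n : ℤ) == κ)) = true ↔
      ∃ s ∈ cur, ∃ t ∈ cur, pvKey s (n : ℤ) = κ ∧ pvKey t (n : ℤ) = κ ∧ pvChr s n ≠ pvChr t n := by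
  cases h : cur.filter (fun s => pvKey s (n : ℤ) == κ) with
  | nil =>
      rw [show pvGrpDiff (n : ℤ) [] = false from rfl]
      simp only [Bool.false_eq_true, false_iff]
      rintro ⟨s, hs, _t, _ht, hks, _⟩
      exact absurd (by simp [hks]) (List.filter_eq_nil_iff.mp h s hs)
  | cons g0 grp =>
      have hsub : ∀ t ∈ g0 :: grp, t ∈ cur ∧ pvKey t (n : ℤ) = κ := by
        intro t ht
        have hmem : t ∈ cur.filter (fun s => pvKey s (n : ℤ) == κ) := h ▸ ht
        exact ⟨List.mem_of_mem_filter hmem, by simpa using List.of_mem_filter hmem⟩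
      rw [pv_any_ne_iff g0 grp n hn (fun t ht => hL t (hsub t ht).1)]
      constructor
      · rintro ⟨s, hs, t, ht, hne⟩
        exact ⟨s, (hsub s hs).1, t, (hsub t ht).1, (hsub s hs).2, (hsub t ht).2, hne⟩
      · rintro ⟨s, hs, t, ht, hks, hkt, hne⟩
        have hs' : s ∈ g0 :: grp := h ▸ List.mem_filter.mpr ⟨hs, by simp [hks]⟩
        have ht' : t ∈ g0 :: grp := h ▸ List.mem_filter.mpr ⟨ht, by simp [hkt]⟩
        exact ⟨s, hs', t, ht', hne⟩

theorem pv_mem_diffItems (cur : List String) (hL : pvLen4 cur) (n : ℕ) (hn : n < 4)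
    (κ : String) (grp : List String) :
    (((n : ℤ), κ), grp) ∈ pvDiffItems cur ↔
      (∃ s ∈ cur, κ = pvKey s (n : ℤ)) ∧ grp = cur.filter (fun s => pvKey s (n : ℤ) == κ) ∧
      ∃ s ∈ cur, ∃ t ∈ cur, pvKey s (n : ℤ) = κ ∧ pvKey t (n : ℤ) = κ ∧ pvChr s n ≠ pvChr t n := by
  unfold pvDiffItems
  rw [List.mem_filter]
  rw [pv_mem_items cur (((n : ℤ), κ), grp)]
  constructor
  · rintro ⟨⟨hk, hval⟩, hdiff⟩
    obtain ⟨j', hj', s, hs, he⟩ := (pv_mem_keys cur _).mp hk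
    obtain ⟨he1, he2⟩ := Prod.mk.injEq _ _ _ _ ▸ he
    have hκ : κ = pvKey s (n : ℤ) := by
      have := congrArg Prod.snd he
      simpa [← he1] using this
    have hgrp : grp = cur.filter (fun s => pvKey s (n : ℤ) == κ) := by
      simpa [pv_grp cur (n : ℤ) (by simpa using pv_int4 (n:ℤ) |>.mpr ⟨n, hn, rfl⟩) κ] using hval
    refine ⟨⟨s, hs, hκ⟩, hgrp, ?_⟩
    have hdiff' : pvGrpDiff (n : ℤ) (cur.filter (fun s => pvKey s (n : ℤ) == κ)) = true := by
      simpa [hgrp] using hdiff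
    exact (pv_grpDiff_iff cur hL n hn κ).mp hdiff'
  · rintro ⟨⟨s, hs, hκ⟩, hgrp, hdiff⟩
    have hjmem : ((n : ℤ)) ∈ ([0, 1, 2, 3] : List ℤ) := (pv_int4 (n : ℤ)).mpr ⟨n, hn, rfl⟩
    refine ⟨⟨?_, ?_⟩, ?_⟩
    · exact (pv_mem_keys cur _).mpr ⟨(n : ℤ), hjmem, s, hs, by rw [hκ]⟩
    · simpa [pv_grp cur (n : ℤ) hjmem κ] using hgrp
    · show pvGrpDiff (n : ℤ) grp = true
      rw [hgrp]
      exact (pv_grpDiff_iff cur hL n hn κ).mpr hdiff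

theorem pv_diffItems_shape (cur : List String) (p : (ℤ × String) × List String)
    (hp : p ∈ pvDiffItems cur) :
    ∃ n : ℕ, n < 4 ∧ p.1.1 = (n : ℤ) := by
  unfold pvDiffItems at hp
  have hk := ((pv_mem_items cur p).mp (List.mem_filter.mp hp).1).1
  obtain ⟨j', hj', s, hs, he⟩ := (pv_mem_keys cur _).mp hk
  obtain ⟨n, hn, rfl⟩ := (pv_int4 j').mp hj'
  exact ⟨n, hn, by rw [he]⟩

theorem pv_stepB_mem (cur : List String) (hL : pvLen4 cur) (x : String) :
    x ∈ pvStepB cur ↔ pvNextP cur x := by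
  have hmask : x ∈ (pvDiffItems cur).map (fun p => p.1.2) ↔
      ∃ a ∈ cur, ∃ b ∈ cur, ∃ j, pvMatch a b j ∧ x = pvKey a (j : ℤ) := by
    rw [List.mem_map]
    constructor
    · rintro ⟨p, hp, hx⟩
      obtain ⟨n, hn, h11⟩ := pv_diffItems_shape cur p hp
      obtain ⟨⟨p1, κ⟩, grp⟩ := p
      simp only at h11 hx
      subst h11
      obtain ⟨_, _, u, hu, v, hv, hku, hkv, hne⟩ :=
        (pv_mem_diffItems cur hL n hn κ grp).mp hp
      refine ⟨u, hu, v, hv, n, ⟨hn, hne, ?_⟩, by rw [← hx, hku]⟩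
      exact (pv_key_eq_iff u v n hn (hL u hu) (hL v hv)).mp (hku.trans hkv.symm)
    · rintro ⟨a, ha, b, hb, j, ⟨hj4, hne, hag⟩, rfl⟩
      refine ⟨(((j : ℤ), pvKey a (j : ℤ)),
        cur.filter (fun s => pvKey s (j : ℤ) == pvKey a (j : ℤ))), ?_, rfl⟩
      refine (pv_mem_diffItems cur hL j hj4 _ _).mpr ⟨⟨a, ha, rfl⟩, rfl,
        a, ha, b, hb, rfl, ?_, hne⟩
      exact (pv_key_eq_iff b a j hj4 (hL b hb) (hL a ha)).mpr
        (fun i hi hij => (hag i hi hij).symm)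
  have hmatched : x ∈ cur → ((x ∈ (pvDiffItems cur).flatMap (fun p => p.2)) ↔
      ∃ b ∈ cur, ∃ j, pvMatch x b j) := by
    intro hx
    rw [List.mem_flatMap]
    constructor
    · rintro ⟨p, hp, hxg⟩
      obtain ⟨n, hn, h11⟩ := pv_diffItems_shape cur p hp
      obtain ⟨⟨p1, κ⟩, grp⟩ := p
      simp only at h11 hxg
      subst h11
      obtain ⟨_, hgrp, u, hu, v, hv, hku, hkv, hne⟩ :=
        (pv_mem_diffItems cur hL n hn κ grp).mp hp
      rw [hgrp] at hxg
      have hkx : pvKey x (n : ℤ) = κ := by simpa using List.of_mem_filter hxg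
      by_cases hcx : pvChr x n = pvChr u n
      · refine ⟨v, hv, n, hn, fun e => hne (hcx.symm.trans e), ?_⟩
        exact (pv_key_eq_iff x v n hn (hL x hx) (hL v hv)).mp (hkx.trans hkv.symm)
      · refine ⟨u, hu, n, hn, hcx, ?_⟩
        exact (pv_key_eq_iff x u n hn (hL x hx) (hL u hu)).mp (hkx.trans hku.symm)
    · rintro ⟨b, hb, j, ⟨hj4, hne, hag⟩⟩
      refine ⟨(((j : ℤ), pvKey x (j : ℤ)),
        cur.filter (fun s => pvKey s (j : ℤ) == pvKey x (j : ℤ))), ?_, ?_⟩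
      · refine (pv_mem_diffItems cur hL j hj4 _ _).mpr ⟨⟨x, hx, rfl⟩, rfl,
          x, hx, b, hb, rfl, ?_, hne⟩
        exact (pv_key_eq_iff b x j hj4 (hL b hb) (hL x hx)).mpr
          (fun i hi hij => (hag i hi hij).symm)
      · exact List.mem_filter.mpr ⟨hx, by simp⟩
  unfold pvStepB
  rw [PySem.Set.mem_union, PySem.Set.mem_ofList, PySem.Set.mem_diff, PySem.Set.mem_ofList]
  unfold pvNextP
  exact or_congr hmask (and_congr_right (fun hx => not_congr (hmatched hx)))

theorem pv_stepB_nodup (cur : List String) : (pvStepB cur).Nodup := by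
  unfold pvStepB
  exact PySem.Set.nodup_union _ _ (PySem.Set.nodup_ofList _)

-- ============ the two loops compute the same set ============

theorem pv_nextP_ext (L M : List String) (h : ∀ y, y ∈ L ↔ y ∈ M) (x : String) :
    pvNextP L x ↔ pvNextP M x := by
  unfold pvNextP
  simp only [h]

theorem pv_nextP_len4 (L : List String) (hL : pvLen4 L) (x : String) (h : pvNextP L x) :
    4 ≤ x.toList.length := by
  rcases h with ⟨a, ha, _b, _hb, j, hm, rfl⟩ | ⟨hx, _⟩
  · rw [pv_key_len a j hm.1 (hL a ha)]
  · exact hL x hx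

theorem pv_loop_eq (f : ℕ) : ∀ (LA LB : List String), (∀ y, y ∈ LA ↔ y ∈ LB) → pvLen4 LA →
    LB.Nodup →
    (∀ y, y ∈ pvLoopA f LA ↔ y ∈ pvLoopB f LB) ∧ (pvLoopA f LA).Nodup ∧ (pvLoopB f LB).Nodup := by
  induction f with
  | zero =>
      intro LA LB h hL hnd
      exact ⟨fun y => by rw [pvLoopA, pvLoopB, PySem.Set.mem_ofList]; exact h y,
        PySem.Set.nodup_ofList LA, hnd⟩
  | succ f ih =>
      intro LA LB h hL hnd
      have hLB : pvLen4 LB := fun s hs => hL s ((h s).mpr hs)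
      have hmem : ∀ y, y ∈ PySem.Set.union (pvStepA LA).1 (pvStepA LA).2 ↔ y ∈ pvStepB LB :=
        fun y => (pv_stepA_mem LA hL y).trans
          ((pv_nextP_ext LA LB h y).trans (pv_stepB_mem LB hLB y).symm)
      have hndA : (PySem.Set.union (pvStepA LA).1 (pvStepA LA).2).Nodup :=
        PySem.Set.nodup_union _ _ (pv_stepA_nodup LA).1
      have hcond : PySem.Set.equal (PySem.Set.union (pvStepA LA).1 (pvStepA LA).2)
          (PySem.Set.ofList LA) = PySem.Set.equal (pvStepB LB) LB := by
        apply Bool.coe_iff_coe.mp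
        rw [PySem.Set.equal_iff, PySem.Set.equal_iff]
        constructor
        · intro H x
          exact ((hmem x).symm.trans (H x)).trans ((PySem.Set.mem_ofList LA x).trans (h x))
        · intro H x
          exact ((hmem x).trans (H x)).trans ((h x).symm.trans (PySem.Set.mem_ofList LA x).symm)
      simp only [pvLoopA, pvLoopB]
      by_cases hc : PySem.Set.equal (PySem.Set.union (pvStepA LA).1 (pvStepA LA).2)
          (PySem.Set.ofList LA) = true
      · rw [if_pos hc, if_pos (hcond ▸ hc)]
        exact ⟨hmem, hndA, pv_stepB_nodup LB⟩
      · rw [if_neg hc, if_neg (fun hcb => hc (hcond.symm ▸ hcb))]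
        exact ih _ _ hmem
          (fun s hs => pv_nextP_len4 LA hL s ((pv_stepA_mem LA hL s).mp hs))
          (pv_stepB_nodup LB)

-- ===== VERDICT (by name: the statement is the Claim_ definition above) =====
theorem am_nam_spec : Claim_equal_am_nam := by
  unfold Claim_equal_am_nam Spec_am_nam
  intro l _hdom hpre
  have hL : pvLen4 l := by
    intro s hs
    have h2 : (4 : ℤ) ≤ s.toList.length := by simpa [PySem.Str.len] using hpre s hs
    exact_mod_cast h2
  unfold am_nam am_nam_alt
  obtain ⟨hm, hndA, hndB⟩ := pv_loop_eq ((17 * l.length + 1) ^ 5) l (PySem.Set.ofList l)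
    (fun y => (PySem.Set.mem_ofList l y).symm) hL (PySem.Set.nodup_ofList l)
  exact PySem.List.sorted_eq_sorted_of_perm _ _ _ (fun a b hab => hab)
    ((List.perm_ext_iff_of_nodup hndA hndB).mpr hm)
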